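-- pv_equiv track=rewrite | github.com/samuelfa/python-hyperskill-smart-calculator | calculator.py | simplify_duplicate_operators
-- ===== SOURCE A (Python) =====
-- def simplify_duplicate_operators(option, operator, pair_operator):
--     duplicates = []
--     elements = option.split()
--     final_list = []
--     for element in elements:
--         if element == operator:
--             duplicates.append(element)
--         else:
--             if len(duplicates) > 0:
--                 if len(duplicates) % 2 == 0:
--                     final_list.append(pair_operator)
--                 else:
--                     final_list.append(operator)
--                 duplicates = []
--
--             final_list.append(element)
--
--     return ' '.join(final_list)
-- ===== SOURCE B (Python) =====
-- def simplify_duplicate_operators(option, operator, pair_operator):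
--     # Run-based recursion: count each operator run directly instead of
--     # accumulating duplicates in a list; a trailing run is dropped naturally.
--     def go(tokens):
--         if not tokens:
--             return []
--         if tokens[0] != operator:
--             return [tokens[0]] + go(tokens[1:])
--         k = 0
--         while k < len(tokens) and tokens[k] == operator:
--             k += 1
--         if k == len(tokens):
--             return []
--         collapsed = pair_operator if k % 2 == 0 else operator
--         return [collapsed] + go(tokens[k:])
--     return ' '.join(go(option.split()))
-- ===== Notes on version B (the rewrite author's own statement) =====
-- stated objective: alternative
-- what changed: Replaces the single fold that accumulates a list of duplicate operators and a growing result list with a run-based recursion that counts each operator run with an integer, collapses it by parity, and recurses on the remainder.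
import Mathlib
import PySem

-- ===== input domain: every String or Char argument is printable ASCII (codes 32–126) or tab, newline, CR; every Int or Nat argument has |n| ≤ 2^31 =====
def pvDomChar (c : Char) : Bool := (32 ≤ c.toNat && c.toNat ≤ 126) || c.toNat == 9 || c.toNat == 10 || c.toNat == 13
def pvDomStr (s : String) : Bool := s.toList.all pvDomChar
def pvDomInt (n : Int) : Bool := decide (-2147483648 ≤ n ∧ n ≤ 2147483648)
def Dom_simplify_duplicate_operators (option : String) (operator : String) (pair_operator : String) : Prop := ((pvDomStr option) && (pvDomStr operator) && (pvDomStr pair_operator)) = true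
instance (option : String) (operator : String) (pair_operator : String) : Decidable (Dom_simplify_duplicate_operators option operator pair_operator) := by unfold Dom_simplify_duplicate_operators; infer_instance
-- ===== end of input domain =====

-- B replaces A's fold (accumulating a list of duplicate operators) by a run-based
-- recursion counting each operator run with an integer; same cost, different structure.

-- ===== PORT A =====
def pvA_step (operator pair_operator : String) (st : List String × List String) (element : String) : List String × List String :=
  if element == operator then (st.1 ++ [element], st.2)
  else
    let final_list :=
      if st.1.length > 0 then
        (if st.1.length % 2 == 0 then st.2 ++ [pair_operator] else st.2 ++ [operator])
      else st.2
    ([], final_list ++ [element])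

def simplify_duplicate_operators (option : String) (operator : String) (pair_operator : String) : String :=
  let elements := PySem.Str.split₀ option
  let res := elements.foldl (pvA_step operator pair_operator) ([], [])
  PySem.Str.join " " res.2

-- ===== PORT B =====
def pvB_runLen (operator : String) : List String → Nat
  | [] => 0
  | t :: ts => if t == operator then 1 + pvB_runLen operator ts else 0

def pvB_go (operator pair_operator : String) : List String → List String
  | [] => []
  | t :: ts =>
    if t != operator then t :: pvB_go operator pair_operator ts
    else
      let k := 1 + pvB_runLen operator ts
      let rest := (t :: ts).drop k
      if rest = [] then []
      else (if k % 2 == 0 then pair_operator else operator) :: pvB_go operator pair_operator rest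
termination_by l => l.length
decreasing_by
  all_goals simp [List.length_drop]

def simplify_duplicate_operators_alt (option : String) (operator : String) (pair_operator : String) : String :=
  PySem.Str.join " " (pvB_go operator pair_operator (PySem.Str.split₀ option))

-- ===== PRECONDITION & SPEC =====
def Spec_simplify_duplicate_operators (option : String) (operator : String) (pair_operator : String) (out : String) : Prop := out = simplify_duplicate_operators_alt option operator pair_operator
instance (option : String) (operator : String) (pair_operator : String) (out : String) : Decidable (Spec_simplify_duplicate_operators option operator pair_operator out) := by unfold Spec_simplify_duplicate_operators; infer_instance

-- ===== CLAIM (what is proved, stated in full; the proofs are below) =====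
def Claim_equal_simplify_duplicate_operators : Prop := ∀ (option : String) (operator : String) (pair_operator : String), Dom_simplify_duplicate_operators option operator pair_operator → Spec_simplify_duplicate_operators option operator pair_operator (simplify_duplicate_operators option operator pair_operator)

-- ===== LEMMAS AND PROOFS =====

/-- A's loop rewritten as "remaining output" recursion; only the length of
`duplicates` matters, carried here as `d`. -/
def pvLoopA (operator pair_operator : String) : Nat → List String → List String
  | _, [] => []
  | d, t :: ts =>
    if t == operator then pvLoopA operator pair_operator (d+1) ts
    else (if d > 0 then [if d % 2 == 0 then pair_operator else operator] else []) ++ t :: pvLoopA operator pair_operator 0 ts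

theorem pvFoldA (operator pair_operator : String) (ts : List String) :
    ∀ (dup acc : List String),
      (ts.foldl (pvA_step operator pair_operator) (dup, acc)).2
        = acc ++ pvLoopA operator pair_operator dup.length ts := by
  induction ts with
  | nil => intro dup acc; simp [pvLoopA]
  | cons t ts ih =>
    intro dup acc
    by_cases h : (t == operator) = true
    · simp [pvA_step, h, pvLoopA, ih]
    · simp [pvA_step, h, pvLoopA, ih]
      split_ifs <;> simp

theorem pvLoopA_succ (operator pair_operator : String) (ts : List String) :
    ∀ d : Nat,
      pvLoopA operator pair_operator (d+1) ts
        = (if ts.drop (pvB_runLen operator ts) = [] then []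
           else (if (d + 1 + pvB_runLen operator ts) % 2 == 0 then pair_operator else operator)
                :: pvLoopA operator pair_operator 0 (ts.drop (pvB_runLen operator ts))) := by
  induction ts with
  | nil => intro d; simp [pvLoopA, pvB_runLen]
  | cons t ts ih =>
    intro d
    by_cases h : (t == operator) = true
    · have : pvB_runLen operator (t :: ts) = 1 + pvB_runLen operator ts := by
        simp [pvB_runLen, h]
      rw [this]
      have hds : (t :: ts).drop (1 + pvB_runLen operator ts) = ts.drop (pvB_runLen operator ts) := by
        simp [List.drop_succ_cons, Nat.add_comm 1 (pvB_runLen operator ts)]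
      rw [hds]
      simp only [pvLoopA, h, if_pos]
      rw [ih (d+1)]
      simp only [Nat.add_assoc]
    · have : pvB_runLen operator (t :: ts) = 0 := by simp [pvB_runLen, h]
      rw [this]
      simp [pvLoopA, h]

theorem pvLoopA_eq_go (operator pair_operator : String) :
    ∀ (n : Nat) (ts : List String), ts.length ≤ n →
      pvLoopA operator pair_operator 0 ts = pvB_go operator pair_operator ts := by
  intro n
  induction n with
  | zero =>
    intro ts h
    have : ts = [] := by cases ts <;> simp_all
    subst this
    rw [pvB_go.eq_def]
    simp [pvLoopA]
  | succ n ih =>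
    intro ts h
    cases ts with
    | nil => rw [pvB_go.eq_def]; simp [pvLoopA]
    | cons t ts =>
      by_cases hop : (t == operator) = true
      · have hne : (t != operator) = false := by simp [bne, hop]
        rw [pvB_go.eq_def]
        simp only [hne, Bool.false_eq_true, if_neg, not_false_iff]
        simp only [pvLoopA, hop, if_pos]
        rw [pvLoopA_succ]
        have hds : (t :: ts).drop (1 + pvB_runLen operator ts) = ts.drop (pvB_runLen operator ts) := by
          simp [List.drop_succ_cons, Nat.add_comm 1 (pvB_runLen operator ts)]
        rw [hds]
        have hlen : (ts.drop (pvB_runLen operator ts)).length ≤ n := by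
          rw [List.length_drop]
          simp only [List.length_cons] at h
          omega
        rw [ih _ hlen]
      · have hne : (t != operator) = true := by simp [bne, hop]
        rw [pvB_go.eq_def]
        simp only [hne, if_pos]
        simp only [pvLoopA, hop, Bool.false_eq_true, if_neg, not_false_iff]
        have hlen : ts.length ≤ n := by simp at h; omega
        simp [ih _ hlen]

-- ===== VERDICT (by name: the statement is the Claim_ definition above) =====
theorem simplify_duplicate_operators_spec : Claim_equal_simplify_duplicate_operators := by
  intro option operator pair_operator _
  unfold Spec_simplify_duplicate_operators simplify_duplicate_operators simplify_duplicate_operators_alt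
  show PySem.Str.join " " (List.foldl (pvA_step operator pair_operator) ([], []) (PySem.Str.split₀ option)).2
      = PySem.Str.join " " (pvB_go operator pair_operator (PySem.Str.split₀ option))
  rw [pvFoldA, List.length_nil, List.nil_append,
      pvLoopA_eq_go operator pair_operator (PySem.Str.split₀ option).length _ (le_refl _)]
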